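-- pv_equiv track=rewrite | github.com/khanal-deepa/PDFSearchEngine | indexer.py | divide_text_into_chunks
-- ===== SOURCE A (Python) =====
-- def divide_text_into_chunks(text):
--     lines = text.split('\n')
--     chunks = []
--     chunk = ""
--     for line in lines:
--         if line.strip() and line.strip()[0].isupper():  # A simple heuristic to detect headings
--             if chunk:
--                 chunks.append(chunk.strip())
--                 chunk = ""
--         chunk += line + "\n"
--     if chunk:
--         chunks.append(chunk.strip())
--     return chunks
-- ===== SOURCE B (Python) =====
-- def divide_text_into_chunks(text):
--     # chunk-at-a-time: scan forward to the next heading, slice, join, strip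
--     def is_heading(line):
--         s = line.strip()
--         return s != "" and s[0].isupper()
--
--     lines = text.split('\n')
--     chunks = []
--     while lines:
--         k = 1
--         while k < len(lines) and not is_heading(lines[k]):
--             k += 1
--         chunks.append('\n'.join(lines[:k]).strip())
--         lines = lines[k:]
--     return chunks
-- ===== Notes on version B (the rewrite author's own statement) =====
-- stated objective: alternative
-- what changed: A accumulates one growing chunk string and flushes it at each heading; B instead scans forward to the next heading, slices that block of lines, and joins+strips it per chunk, never maintaining a partial-chunk accumulator.
import Mathlib
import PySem

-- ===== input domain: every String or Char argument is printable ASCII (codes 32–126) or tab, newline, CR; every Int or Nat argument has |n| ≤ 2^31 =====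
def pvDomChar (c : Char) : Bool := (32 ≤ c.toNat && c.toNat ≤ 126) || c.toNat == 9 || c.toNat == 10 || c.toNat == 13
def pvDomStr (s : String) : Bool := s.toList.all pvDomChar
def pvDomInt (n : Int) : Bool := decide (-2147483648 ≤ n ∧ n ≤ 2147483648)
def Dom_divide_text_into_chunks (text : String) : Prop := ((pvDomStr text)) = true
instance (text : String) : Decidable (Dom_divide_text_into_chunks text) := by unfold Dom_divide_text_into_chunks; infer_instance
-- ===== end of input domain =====

-- B replaces A's single accumulate-and-flush string pass by a chunk-at-a-time scan
-- (advance to the next heading, slice, join, strip); objective: alternative decomposition.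

-- ===== PORT A =====
-- 'line.strip() and line.strip()[0].isupper()' (truthiness of the stripped string, then its first char)
def pvHeading (l : List Char) : Bool :=
  match PySem.Chars.strip l with
  | [] => false
  | c :: _ => PySem.Chars.isupper c

-- one iteration of A's for-loop: possibly flush the chunk, then chunk += line + "\n"
def pvStepA (st : List (List Char) × List Char) (line : List Char) : List (List Char) × List Char :=
  let st' := if pvHeading line then
               (if st.2 ≠ [] then (st.1 ++ [PySem.Chars.strip st.2], ([] : List Char)) else st)
             else st
  (st'.1, st'.2 ++ line ++ ['\n'])

def divide_text_into_chunks (text : String) : List String :=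
  let lines := PySem.Chars.splitOn text.toList ['\n']
  let st := lines.foldl pvStepA ([], [])
  let chunks := if st.2 ≠ [] then st.1 ++ [PySem.Chars.strip st.2] else st.1
  chunks.map String.ofList

-- ===== PORT B =====
-- Source B's outer 'while lines' loop; the inner index scan 'k' up to the next heading is
-- the takeWhile/dropWhile split of the remaining lines (lines[:k] / lines[k:]).
def pvGoB : List (List Char) → List (List Char)
  | [] => []
  | l :: ls =>
      PySem.Chars.strip (PySem.Chars.join ['\n'] (l :: ls.takeWhile (fun x => !pvHeading x)))
        :: pvGoB (ls.dropWhile (fun x => !pvHeading x))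
  termination_by ls => ls.length
  decreasing_by
    exact Nat.lt_succ_of_le (List.length_dropWhile_le _ _)

def divide_text_into_chunks_alt (text : String) : List String :=
  (pvGoB (PySem.Chars.splitOn text.toList ['\n'])).map String.ofList

-- ===== PRECONDITION & SPEC =====
def Spec_divide_text_into_chunks (text : String) (out : List String) : Prop := out = divide_text_into_chunks_alt text
instance (text : String) (out : List String) : Decidable (Spec_divide_text_into_chunks text out) := by unfold Spec_divide_text_into_chunks; infer_instance

-- ===== CLAIM (what is proved, stated in full; the proofs are below) =====
def Claim_equal_divide_text_into_chunks : Prop := ∀ (text : String), Dom_divide_text_into_chunks text → Spec_divide_text_into_chunks text (divide_text_into_chunks text)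

-- ===== LEMMAS AND PROOFS =====

-- A's loop after the first line, with the trailing flush folded in
def pvRunA (c : List Char) : List (List Char) → List (List Char)
  | [] => [PySem.Chars.strip c]
  | l :: ls =>
      if pvHeading l then PySem.Chars.strip c :: pvRunA (l ++ ['\n']) ls
      else pvRunA (c ++ l ++ ['\n']) ls

theorem pvStrip_newline (s : List Char) :
    PySem.Chars.strip (s ++ ['\n']) = PySem.Chars.strip s := by
  simp only [PySem.Chars.strip, PySem.Chars.lstrip, PySem.Chars.rstrip, List.dropWhile_append]
  split
  · rename_i h
    rw [List.isEmpty_iff] at h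
    rw [h]
    decide
  · simp [PySem.Chars.isspace]

theorem pvFoldA (ls : List (List Char)) : ∀ (acc : List (List Char)) (c : List Char), c ≠ [] →
    (let st := ls.foldl pvStepA (acc, c)
     if st.2 ≠ [] then st.1 ++ [PySem.Chars.strip st.2] else st.1) = acc ++ pvRunA c ls := by
  induction ls with
  | nil => intro acc c hc; simp [pvRunA, hc]
  | cons l ls ih =>
      intro acc c hc
      simp only [List.foldl_cons]
      by_cases h : pvHeading l
      · have hst : pvStepA (acc, c) l = (acc ++ [PySem.Chars.strip c], l ++ ['\n']) := by
          simp [pvStepA, h, hc]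
        rw [hst]
        have hr := ih (acc ++ [PySem.Chars.strip c]) (l ++ ['\n']) (by simp)
        simp only [pvRunA, h, if_true]
        rw [hr]
        simp
      · have hst : pvStepA (acc, c) l = (acc, c ++ l ++ ['\n']) := by
          simp [pvStepA, h]
        rw [hst]
        have hr := ih acc (c ++ l ++ ['\n']) (by simp)
        simp only [pvRunA, h, Bool.false_eq_true, if_false]
        exact hr

-- l + '\n' + (each taken line + '\n')  =  '\n'.join(l :: taken) + '\n'
theorem pvJoinFlat (g : List (List Char)) : ∀ (l : List Char),
    l ++ ['\n'] ++ g.flatMap (· ++ ['\n']) = PySem.Chars.join ['\n'] (l :: g) ++ ['\n'] := by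
  induction g with
  | nil => intro l; simp [PySem.Chars.join, List.intercalate]
  | cons q g ih =>
      intro l
      rw [PySem.Chars.join_cons_cons, List.flatMap_cons]
      have h := ih q
      simp only [List.append_assoc] at h ⊢
      rw [h]

theorem pvRunA_eq (ls : List (List Char)) : ∀ (c : List Char),
    pvRunA c ls =
      PySem.Chars.strip (c ++ (ls.takeWhile (fun x => !pvHeading x)).flatMap (· ++ ['\n']))
        :: pvGoB (ls.dropWhile (fun x => !pvHeading x)) := by
  induction ls with
  | nil => intro c; simp [pvRunA, pvGoB]
  | cons l ls ih =>
      intro c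
      by_cases h : pvHeading l
      · simp only [pvRunA, h, if_true, List.takeWhile_cons, List.dropWhile_cons,
          Bool.not_true, Bool.false_eq_true, if_false]
        rw [ih (l ++ ['\n']), pvGoB]
        simp only [List.flatMap_nil, List.append_nil]
        congr 1
        rw [pvJoinFlat, pvStrip_newline]
      · simp only [pvRunA, h, Bool.false_eq_true, if_false, List.takeWhile_cons,
          List.dropWhile_cons, Bool.not_false, if_true]
        rw [ih (c ++ l ++ ['\n'])]
        simp

-- ===== VERDICT (by name: the statement is the Claim_ definition above) =====
theorem divide_text_into_chunks_spec : Claim_equal_divide_text_into_chunks := by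
  intro text _
  show _ = _
  unfold divide_text_into_chunks divide_text_into_chunks_alt
  cases hls : PySem.Chars.splitOn text.toList ['\n'] with
  | nil => simp [pvGoB]
  | cons l0 rest =>
      simp only [List.foldl_cons]
      have h0 : pvStepA ([], []) l0 = ([], l0 ++ ['\n']) := by
        simp [pvStepA]
      rw [h0]
      have hf := pvFoldA rest [] (l0 ++ ['\n']) (by simp)
      simp only at hf
      rw [hf, pvRunA_eq, pvGoB]
      simp only [List.nil_append]
      congr 2
      rw [pvJoinFlat, pvStrip_newline]
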